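-- pv_equiv track=rewrite | github.com/Niccolo-Ajroldi/plainLM | data/datasets/data_prep_utils.py | _get_docs_boundaries
-- ===== SOURCE A (Python) =====
-- from typing import Dict, List, Any
--
-- def _get_docs_boundaries(doc_lengths: List[int], n_chunks: int, max_seq_length: int) -> List[List[int]]:
--     """
--     Get the boundaries of documents in the concatenated chunks.
--
--     A list of documents has been concatenated and chunked into `n_chunks` of `max_seq_length`.
--     Each original document had a different length, defined in `doc_lengths`.
--
--     We need to determine how many tokens from each document are present in each chunk.
--     This function returns a list of lists, where each inner list contains the lengths of document
--     segments that are present in the corresponding chunk.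
--
--     For example, if `doc_lengths = [10, 20, 40]`, `n_chunks = 2`, and `max_seq_length = 30`,
--     the output will be:
--     [
--         [10, 20],  # First chunk contains 10 tokens from the first doc and 20 from the second doc.
--         [30]       # Second chunk contains 30 tokens from the third doc.
--     ]
--     """
--
--     # doc_boundaries[i] will contain the length of document segments within the i-th chunk
--     doc_boundaries = [[] for _ in range(n_chunks)]
--
--     doc_idx = 0 # Index of the current document being processed
--     current_doc_remainder = 0 # Remaining length of the current document being processed
--
--     # Iterate through each generated chunk
--     for chunk_idx in range(n_chunks):
--         current_chunk_filled_length = 0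
--
--         # Fill the current chunk
--         while current_chunk_filled_length < max_seq_length:
--             if current_doc_remainder == 0:
--                 # If the previous document part is fully consumed, get the next document
--                 if doc_idx < len(doc_lengths):
--                     current_doc_remainder = doc_lengths[doc_idx]
--                     doc_idx += 1
--                 else:
--                     # No more documents to add. Fill the rest of the chunk with padding if necessary.
--                     # Given 'total_length' truncation, this loop should ideally only break when
--                     # current_chunk_filled_length == max_seq_length, or if it's the very last
--                     # (possibly incomplete) chunk if total_length wasn't a perfect multiple.
--                     # Since we truncated total_length to be a multiple, this `break` handles
--                     # any edge cases where the last chunk might not be fully filled by documents.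
--                     break
--
--             # Calculate how much of the current document can fit into the remaining space of the chunk
--             space_in_chunk = max_seq_length - current_chunk_filled_length
--             amount_to_add = min(current_doc_remainder, space_in_chunk)
--
--             doc_boundaries[chunk_idx].append(amount_to_add)
--             current_chunk_filled_length += amount_to_add
--             current_doc_remainder -= amount_to_add
--
--     return doc_boundaries
-- ===== SOURCE B (Python) =====
-- from typing import List
--
-- def _get_docs_boundaries(doc_lengths: List[int], n_chunks: int, max_seq_length: int) -> List[List[int]]:
--     # Doc-major pass: walk the documents once and split each one across the
--     # chunks it spans, instead of refilling chunk after chunk from a doc cursor.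
--     boundaries = [[] for _ in range(n_chunks)]
--     if max_seq_length <= 0:
--         return boundaries
--     chunk, filled = 0, 0
--     for length in doc_lengths:
--         if chunk >= n_chunks:
--             break
--         remainder = length
--         while True:
--             piece = min(remainder, max_seq_length - filled)
--             boundaries[chunk].append(piece)
--             filled += piece
--             remainder -= piece
--             if filled < max_seq_length:
--                 break  # piece == remainder, the document ends inside this chunk
--             chunk += 1
--             filled = 0
--             if remainder == 0 or chunk >= n_chunks:
--                 break
--     return boundaries
-- ===== Notes on version B (the rewrite author's own statement) =====
-- stated objective: simpler
-- what changed: Replaced A's chunk-major structure (outer loop over chunks, inner while refilling each chunk from a persistent document cursor/remainder) with a single doc-major pass: one loop over documents whose inner loop splits the current document across the chunks it spans.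
import Mathlib
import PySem

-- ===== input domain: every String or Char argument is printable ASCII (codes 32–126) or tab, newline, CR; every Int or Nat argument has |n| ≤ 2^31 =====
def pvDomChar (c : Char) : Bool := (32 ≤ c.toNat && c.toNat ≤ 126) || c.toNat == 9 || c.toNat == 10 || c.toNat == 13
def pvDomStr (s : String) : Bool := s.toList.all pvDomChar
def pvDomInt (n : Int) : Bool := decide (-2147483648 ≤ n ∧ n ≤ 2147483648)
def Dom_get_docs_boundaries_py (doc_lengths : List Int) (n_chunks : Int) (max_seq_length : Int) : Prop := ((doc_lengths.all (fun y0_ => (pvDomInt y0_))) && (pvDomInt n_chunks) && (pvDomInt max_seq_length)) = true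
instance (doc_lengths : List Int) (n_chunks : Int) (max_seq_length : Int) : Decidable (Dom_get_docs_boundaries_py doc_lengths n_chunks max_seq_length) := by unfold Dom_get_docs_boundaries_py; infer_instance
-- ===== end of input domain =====

-- B replaces A's chunk-major fill (outer loop over chunks, inner while refilling from a
-- persistent doc cursor) with a single doc-major pass splitting each document across the
-- chunks it spans (objective: simpler; same return value on every input).

-- ===== PORT A =====
-- the inner `while current_chunk_filled_length < max_seq_length` loop of A, one
-- Python iteration per recursive step; returns (chunk contents, doc_idx, remainder)
def pvA_fill (dl : List Int) (L : Int) (di : Nat) (rem filled : Int) (acc : List Int) :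
    List Int × Nat × Int :=
  if filled < L then
    if rem = 0 then
      if h : di < dl.length then
        -- pull the next document, then fall through to the append of the same iteration
        let ℓ := dl[di]
        let amount := min ℓ (L - filled)
        pvA_fill dl L (di + 1) (ℓ - amount) (filled + amount) (acc ++ [amount])
      else
        (acc, di, rem)  -- break
    else
      let amount := min rem (L - filled)
      pvA_fill dl L di (rem - amount) (filled + amount) (acc ++ [amount])
  else
    (acc, di, rem)
termination_by (dl.length - di, if rem < 0 then 1 else 0, (L - filled).toNat)
decreasing_by
  · exact Prod.Lex.left _ _ (by omega)
  · rcases lt_trichotomy rem 0 with hr | hr | hr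
    · have h1 : min rem (L - filled) = rem := by omega
      refine Prod.Lex.right _ (Prod.Lex.left _ _ ?_)
      simp [h1, hr]
    · simp_all
    · refine Prod.Lex.right _ (Prod.Lex.right' _ ?_ ?_)
      · simp [show ¬ (rem - min rem (L - filled) < 0) from by omega,
          show ¬ (rem < 0) from by omega]
      · omega

-- the outer `for chunk_idx in range(n_chunks)` loop of A
def pvA_chunks (dl : List Int) (L : Int) : Nat → Nat → Int → List (List Int)
  | 0, _, _ => []
  | k + 1, di, rem =>
    let r := pvA_fill dl L di rem 0 []
    r.1 :: pvA_chunks dl L k r.2.1 r.2.2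

def get_docs_boundaries_py (doc_lengths : List Int) (n_chunks : Int) (max_seq_length : Int) :
    List (List Int) :=
  pvA_chunks doc_lengths max_seq_length n_chunks.toNat 0 0

-- ===== PORT B =====
-- boundaries = done ++ [cur] ++ trailing empties; cur is the chunk currently being filled
def pvB_finish (n : Nat) (done : List (List Int)) (cur : List Int) : List (List Int) :=
  if done.length < n then done ++ cur :: List.replicate (n - done.length - 1) [] else done

-- the inner `while True` loop of B: split one document's remainder over the chunks
def pvB_inner (L : Int) (n : Nat) (rem : Int) (done : List (List Int)) (cur : List Int)
    (filled : Int) : List (List Int) × List Int × Int :=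
  let piece := min rem (L - filled)
  let cur' := cur ++ [piece]
  let filled' := filled + piece
  let rem' := rem - piece
  if filled' < L then (done, cur', filled')
  else
    if rem' = 0 ∨ n ≤ done.length + 1 then (done ++ [cur'], [], 0)
    else pvB_inner L n rem' (done ++ [cur']) [] 0
termination_by n - done.length
decreasing_by
  simp only [List.length_append, List.length_cons, List.length_nil, not_or, not_le] at *
  omega

-- the outer `for length in doc_lengths` loop of B
def pvB_docs (L : Int) (n : Nat) : List Int → List (List Int) → List Int → Int → List (List Int)
  | [], done, cur, _ => pvB_finish n done cur
  | ℓ :: rest, done, cur, filled =>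
    if n ≤ done.length then pvB_finish n done cur
    else
      let r := pvB_inner L n ℓ done cur filled
      pvB_docs L n rest r.1 r.2.1 r.2.2

def get_docs_boundaries_py_alt (doc_lengths : List Int) (n_chunks : Int) (max_seq_length : Int) :
    List (List Int) :=
  if max_seq_length ≤ 0 then List.replicate n_chunks.toNat []
  else pvB_docs max_seq_length n_chunks.toNat doc_lengths [] [] 0

-- ===== PRECONDITION & SPEC =====
def Spec_get_docs_boundaries_py (doc_lengths : List Int) (n_chunks : Int) (max_seq_length : Int) (out : List (List Int)) : Prop := out = get_docs_boundaries_py_alt doc_lengths n_chunks max_seq_length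
instance (doc_lengths : List Int) (n_chunks : Int) (max_seq_length : Int) (out : List (List Int)) : Decidable (Spec_get_docs_boundaries_py doc_lengths n_chunks max_seq_length out) := by unfold Spec_get_docs_boundaries_py; infer_instance

-- ===== CLAIM (what is proved, stated in full; the proofs are below) =====
def Claim_equal_get_docs_boundaries_py : Prop := ∀ (doc_lengths : List Int) (n_chunks : Int) (max_seq_length : Int), Dom_get_docs_boundaries_py doc_lengths n_chunks max_seq_length → Spec_get_docs_boundaries_py doc_lengths n_chunks max_seq_length (get_docs_boundaries_py doc_lengths n_chunks max_seq_length)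

-- ===== LEMMAS AND PROOFS =====

-- step lemmas for A's inner loop
theorem pvA_fill_stop (dl : List Int) (L : Int) (di : Nat) (rem filled : Int) (acc : List Int)
    (h : ¬ filled < L) : pvA_fill dl L di rem filled acc = (acc, di, rem) := by
  rw [pvA_fill, if_neg h]

theorem pvA_fill_break (dl : List Int) (L : Int) (di : Nat) (filled : Int) (acc : List Int)
    (h1 : filled < L) (h2 : ¬ di < dl.length) :
    pvA_fill dl L di 0 filled acc = (acc, di, 0) := by
  rw [pvA_fill, if_pos h1, if_pos rfl, dif_neg h2]

theorem pvA_fill_pull (dl : List Int) (L : Int) (di : Nat) (filled : Int) (acc : List Int)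
    (h1 : filled < L) (h2 : di < dl.length) :
    pvA_fill dl L di 0 filled acc =
      pvA_fill dl L (di + 1) (dl[di] - min dl[di] (L - filled))
        (filled + min dl[di] (L - filled)) (acc ++ [min dl[di] (L - filled)]) := by
  conv_lhs => rw [pvA_fill]
  rw [if_pos h1, if_pos rfl, dif_pos h2]

theorem pvA_fill_step (dl : List Int) (L : Int) (di : Nat) (rem filled : Int) (acc : List Int)
    (h1 : filled < L) (h2 : ¬ rem = 0) :
    pvA_fill dl L di rem filled acc =
      pvA_fill dl L di (rem - min rem (L - filled)) (filled + min rem (L - filled))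
        (acc ++ [min rem (L - filled)]) := by
  conv_lhs => rw [pvA_fill]
  rw [if_pos h1, if_neg h2]

theorem pvA_chunks_succ (dl : List Int) (L : Int) (k : Nat) (di : Nat) (rem : Int) :
    pvA_chunks dl L (k + 1) di rem = (pvA_fill dl L di rem 0 []).1 ::
      pvA_chunks dl L k (pvA_fill dl L di rem 0 []).2.1 (pvA_fill dl L di rem 0 []).2.2 := rfl

-- A's remaining output from a mid-chunk state: current chunk completed from
-- (rem, filled, acc), then the remaining k-1 chunks
def pvA_from (dl : List Int) (L : Int) (k : Nat) (di : Nat) (rem filled : Int) (acc : List Int) :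
    List (List Int) :=
  match k with
  | 0 => []
  | k + 1 =>
    let r := pvA_fill dl L di rem filled acc
    r.1 :: pvA_chunks dl L k r.2.1 r.2.2

theorem pvA_from_zero (dl : List Int) (L : Int) (di : Nat) (rem filled : Int) (acc : List Int) :
    pvA_from dl L 0 di rem filled acc = [] := rfl

theorem pvA_from_succ (dl : List Int) (L : Int) (k : Nat) (di : Nat) (rem filled : Int)
    (acc : List Int) :
    pvA_from dl L (k + 1) di rem filled acc = (pvA_fill dl L di rem filled acc).1 ::
      pvA_chunks dl L k (pvA_fill dl L di rem filled acc).2.1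
        (pvA_fill dl L di rem filled acc).2.2 := rfl

theorem pvA_chunks_eq_from (dl : List Int) (L : Int) (k : Nat) (di : Nat) (rem : Int) :
    pvA_chunks dl L k di rem = pvA_from dl L k di rem 0 [] := by
  cases k <;> rfl

theorem pvA_chunks_L_nonpos (dl : List Int) (L : Int) (hL : L ≤ 0) (k : Nat) :
    ∀ (di : Nat) (rem : Int), pvA_chunks dl L k di rem = List.replicate k [] := by
  induction k with
  | zero => intro di rem; rfl
  | succ k ih =>
    intro di rem
    rw [pvA_chunks_succ, pvA_fill_stop dl L di rem 0 [] (by omega), ih]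
    rfl

theorem pvA_chunks_no_docs (dl : List Int) (L : Int) (k di : Nat) (hdi : dl.length ≤ di) :
    pvA_chunks dl L k di 0 = List.replicate k [] := by
  induction k with
  | zero => rfl
  | succ k ih =>
    have hfill : pvA_fill dl L di 0 0 [] = ([], di, 0) := by
      by_cases h : (0:Int) < L
      · exact pvA_fill_break dl L di 0 [] h (by omega)
      · exact pvA_fill_stop dl L di 0 0 [] h
    rw [pvA_chunks_succ, hfill, ih]
    rfl

theorem pvA_from_no_docs (dl : List Int) (L : Int) (k di : Nat) (f : Int)
    (hdi : dl.length ≤ di) (hf : f < L) (acc : List Int) :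
    pvA_from dl L (k + 1) di 0 f acc = acc :: List.replicate k [] := by
  rw [pvA_from_succ, pvA_fill_break dl L di f acc hf (by omega),
    pvA_chunks_no_docs dl L k di hdi]

-- one full chunk eaten from a large remainder
theorem pvA_from_big_step (dl : List Int) (L : Int) (hL : 0 < L) (k : Nat) (di : Nat) (rem : Int)
    (hrem : L ≤ rem) :
    pvA_from dl L (k + 1) di rem 0 [] = [L] :: pvA_from dl L k di (rem - L) 0 [] := by
  have hmin : min rem (L - 0) = L := by omega
  rw [pvA_from_succ, pvA_fill_step dl L di rem 0 [] (by omega) (by omega), hmin,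
    pvA_fill_stop dl L di (rem - L) (0 + L) ([] ++ [L]) (by omega)]
  rw [pvA_chunks_eq_from]
  simp

-- a remainder below the chunk cap moves whole into the current chunk
theorem pvA_from_small_step (dl : List Int) (L : Int) (hL : 0 < L) (k : Nat) (di : Nat)
    (rem : Int) (h0 : rem ≠ 0) (h1 : rem < L) :
    pvA_from dl L (k + 1) di rem 0 [] = pvA_from dl L (k + 1) di 0 rem [rem] := by
  have hmin : min rem (L - 0) = rem := by omega
  rw [pvA_from_succ, pvA_fill_step dl L di rem 0 [] (by omega) h0, hmin]
  simp only [sub_self, zero_add, List.nil_append]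
  rw [pvA_from_succ]

-- INNER correspondence: B's inner loop from a fresh-chunk state (cur=[], filled=0)
-- consumes exactly what A consumes of the same nonzero remainder
theorem pv_inner (dl : List Int) (L : Int) (hL : 0 < L) (n : Nat) (di : Nat) :
    ∀ (done : List (List Int)) (rem : Int), rem ≠ 0 → done.length < n →
      done ++ pvA_from dl L (n - done.length) di rem 0 [] =
        (pvB_inner L n rem done [] 0).1 ++
          pvA_from dl L (n - (pvB_inner L n rem done [] 0).1.length) di 0
            (pvB_inner L n rem done [] 0).2.2 (pvB_inner L n rem done [] 0).2.1 ∧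
      (pvB_inner L n rem done [] 0).2.2 < L ∧
      (pvB_inner L n rem done [] 0).1.length ≤ n := by
  intro done rem hrem hd
  rw [pvB_inner]
  simp only [List.nil_append, sub_zero, zero_add]
  obtain ⟨k, hk⟩ : ∃ m, n - done.length = m + 1 := ⟨n - done.length - 1, by omega⟩
  by_cases hsmall : min rem L < L
  · -- piece = rem: the document ends inside this chunk
    have hmin : min rem L = rem := by omega
    rw [if_pos hsmall]
    simp only [hmin]
    exact ⟨by rw [hk, pvA_from_small_step dl L hL k di rem hrem (by omega)],
      by omega, by omega⟩
  · -- piece = L: this chunk is exactly filled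
    have hmin : min rem L = L := by omega
    have hLrem : L ≤ rem := by omega
    rw [if_neg hsmall]
    simp only [hmin]
    have hbig := pvA_from_big_step dl L hL k di rem hLrem
    by_cases hstop : rem - L = 0 ∨ n ≤ done.length + 1
    · rw [if_pos hstop]
      simp only [List.length_append, List.length_cons, List.length_nil]
      refine ⟨?_, hL, by omega⟩
      rw [hk, hbig]
      rcases hstop with h0 | hn
      · rw [h0]
        have hkk : n - (done.length + 1) = k := by omega
        rw [hkk]
        simp
      · have hk0 : k = 0 := by omega
        have hz : n - (done.length + 1) = 0 := by omega
        simp [hk0, hz, pvA_from_zero]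
    · rw [if_neg hstop]
      push Not at hstop
      have hd2 : (done ++ [[L]]).length < n := by simp; omega
      have ih := pv_inner dl L hL n di (done ++ [[L]]) (rem - L) hstop.1 hd2
      refine ⟨?_, ih.2.1, ih.2.2⟩
      rw [hk, hbig]
      have hlen : n - (done ++ [[L]]).length = k := by simp; omega
      rw [hlen] at ih
      rw [show done ++ [L] :: pvA_from dl L k di (rem - L) 0 []
          = (done ++ [[L]]) ++ pvA_from dl L k di (rem - L) 0 [] from by simp]
      exact ih.1
termination_by done _ => n - done.length
decreasing_by simp only [List.length_append, List.length_cons, List.length_nil] at *; omega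

theorem pvB_docs_nil (L : Int) (n : Nat) (done : List (List Int)) (cur : List Int) (f : Int) :
    pvB_docs L n [] done cur f = pvB_finish n done cur := rfl

theorem pvB_docs_cons (L : Int) (n : Nat) (ℓ : Int) (rest : List Int)
    (done : List (List Int)) (cur : List Int) (f : Int) :
    pvB_docs L n (ℓ :: rest) done cur f =
      if n ≤ done.length then pvB_finish n done cur
      else pvB_docs L n rest (pvB_inner L n ℓ done cur f).1
        (pvB_inner L n ℓ done cur f).2.1 (pvB_inner L n ℓ done cur f).2.2 := rfl

-- MAIN correspondence: A from a mid-chunk state at a document boundary = B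
theorem pv_main (dl : List Int) (L : Int) (hL : 0 < L) (di : Nat) (f : Int) (hf : f < L)
    (acc : List Int) (done : List (List Int)) (k : Nat) :
    done ++ pvA_from dl L k di 0 f acc =
      pvB_docs L (done.length + k) (dl.drop di) done acc f := by
  cases hk : k with
  | zero =>
    cases hdrop : dl.drop di with
    | nil => rw [pvA_from_zero, pvB_docs_nil, pvB_finish, if_neg (by omega)]; simp
    | cons ℓ rest =>
      rw [pvA_from_zero, pvB_docs_cons, if_pos (by omega), pvB_finish, if_neg (by omega)]
      simp
  | succ k' =>
    cases hdrop : dl.drop di with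
    | nil =>
      have hdi : dl.length ≤ di := by
        by_contra h
        have := List.drop_eq_getElem_cons (l := dl) (by omega : di < dl.length)
        rw [hdrop] at this; simp at this; omega
      rw [pvA_from_no_docs dl L k' di f hdi hf acc, pvB_docs_nil, pvB_finish,
        if_pos (by omega), show done.length + (k' + 1) - done.length - 1 = k' by omega]
    | cons ℓ rest =>
      have hdi : di < dl.length := by
        by_contra h
        rw [List.drop_eq_nil_of_le (by omega)] at hdrop; simp at hdrop
      have hget : dl[di] = ℓ := by
        have := List.drop_eq_getElem_cons (l := dl) hdi
        rw [hdrop] at this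
        exact (List.cons.inj this).1.symm
      have hrest : dl.drop (di + 1) = rest := by
        have := List.drop_eq_getElem_cons (l := dl) hdi
        rw [hdrop] at this
        exact (List.cons.inj this).2.symm
      rw [pvB_docs_cons, if_neg (by omega)]
      -- A pulls doc ℓ; B's inner loop does its first append with the same piece
      rw [pvA_from_succ, pvA_fill_pull dl L di f acc hf hdi, hget, ← pvA_from_succ]
      rw [pvB_inner]
      set piece : Int := min ℓ (L - f) with hpiece
      by_cases hfits : f + piece < L
      · -- the document ends inside the current chunk (piece = ℓ)
        rw [if_pos hfits]
        have heq : ℓ - piece = 0 := by omega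
        rw [heq]
        have := pv_main dl L hL (di + 1) (f + piece) hfits (acc ++ [piece]) done (k' + 1)
        rw [hrest] at this
        exact this
      · -- the current chunk is exactly filled (piece = L - f)
        rw [if_neg hfits]
        have hfL : f + piece = L := by omega
        rw [pvA_from_succ,
          pvA_fill_stop dl L (di + 1) (ℓ - piece) (f + piece) (acc ++ [piece]) (by omega)]
        by_cases hstop : ℓ - piece = 0 ∨ done.length + (k' + 1) ≤ done.length + 1
        · rw [if_pos hstop]
          rcases hstop with h0 | hn
          · -- remainder exhausted at the chunk boundary: both continue from a fresh chunk
            rw [h0, pvA_chunks_eq_from]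
            have := pv_main dl L hL (di + 1) 0 hL [] (done ++ [acc ++ [piece]]) k'
            rw [hrest] at this
            rw [show (done ++ [acc ++ [piece]]).length + k' = done.length + (k' + 1)
              from by simp; omega] at this
            rw [← this]
            simp
          · -- no chunks left: A discards the remainder, B is already complete
            have hk0 : k' = 0 := by omega
            subst hk0
            rw [pvA_chunks_eq_from, pvA_from_zero]
            have hlen1 : ¬ (done ++ [acc ++ [piece]]).length < done.length + (0 + 1) := by
              simp only [List.length_append, List.length_cons, List.length_nil]
              omega
            have hlen2 : done.length + (0 + 1) ≤ (done ++ [acc ++ [piece]]).length := by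
              simp only [List.length_append, List.length_cons, List.length_nil]
              omega
            cases hrest2 : rest with
            | nil =>
              rw [pvB_docs_nil, pvB_finish, if_neg hlen1]
            | cons a b =>
              rw [pvB_docs_cons, if_pos hlen2, pvB_finish, if_neg hlen1]
        · -- remainder spills into later chunks: hand over to the inner lemma
          rw [if_neg hstop]
          push Not at hstop
          rw [pvA_chunks_eq_from]
          have hd2 : (done ++ [acc ++ [piece]]).length < done.length + (k' + 1) := by
            simp; omega
          have hinner := pv_inner dl L hL (done.length + (k' + 1)) (di + 1)
            (done ++ [acc ++ [piece]]) (ℓ - piece) hstop.1 hd2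
          set r := pvB_inner L (done.length + (k' + 1)) (ℓ - piece)
            (done ++ [acc ++ [piece]]) [] 0 with hr
          have hklen : done.length + (k' + 1) - (done ++ [acc ++ [piece]]).length = k' := by
            simp; omega
          rw [hklen] at hinner
          have houter := pv_main dl L hL (di + 1) r.2.2 hinner.2.1 r.2.1 r.1
            (done.length + (k' + 1) - r.1.length)
          rw [hrest] at houter
          rw [show r.1.length + (done.length + (k' + 1) - r.1.length)
              = done.length + (k' + 1) from by omega] at houter
          rw [← houter, ← hinner.1]
          simp
termination_by dl.length - di
decreasing_by all_goals omega

-- ===== VERDICT (by name: the statement is the Claim_ definition above) =====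
theorem get_docs_boundaries_py_spec : Claim_equal_get_docs_boundaries_py := by
  intro dl n L _
  unfold Spec_get_docs_boundaries_py get_docs_boundaries_py get_docs_boundaries_py_alt
  by_cases hL : L ≤ 0
  · rw [if_pos hL, pvA_chunks_L_nonpos dl L hL n.toNat 0 0]
  · rw [if_neg hL, pvA_chunks_eq_from]
    have := pv_main dl L (by omega) 0 0 (by omega) [] [] n.toNat
    simpa using this
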